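-- pv_equiv track=rewrite | github.com/Hunterdii/GeeksforGeeks-POTD | November 2025 GFG SOLUTION/November-23.py | maxRemove
-- ===== SOURCE A (Python) =====
-- def maxRemove(stones):
--     p = {}
--     def find(x):
--         if x not in p: p[x] = x
--         if p[x] != x: p[x] = find(p[x])
--         return p[x]
--     def union(x, y):
--         p[find(x)] = find(y)
--     for r, c in stones:
--         union(r, ~c)
--     return len(stones) - len({find(r) for r, c in stones})
-- ===== SOURCE B (Python) =====
-- def maxRemove(stones):
--     # Label-repaint partition: map each seen node (row r, or column encoded as ~c)
--     # to a component label; merging two components repaints one label into the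
--     # other. No parent forest, no find/union.
--     comp = {}
--     nxt = 0
--     for r, c in stones:
--         u, v = r, ~c
--         a = comp.get(u)
--         b = comp.get(v)
--         if a is None and b is None:
--             comp[u] = nxt
--             comp[v] = nxt
--             nxt += 1
--         elif a is None:
--             comp[u] = b
--         elif b is None:
--             comp[v] = a
--         elif a != b:
--             for k, w in comp.items():
--                 if w == a:
--                     comp[k] = b
--     return len(stones) - len({comp[r] for r, c in stones})
-- ===== Notes on version B (the rewrite author's own statement) =====
-- stated objective: alternative
-- what changed: Replaces the path-compressing union-find (parent dict, recursive find, union by root relinking) with a label-repaint partition: each node carries a component label, merging repaints one label into the other by a sweep over the label dict, and the answer is len(stones) minus the number of distinct row labels.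
import Mathlib
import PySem

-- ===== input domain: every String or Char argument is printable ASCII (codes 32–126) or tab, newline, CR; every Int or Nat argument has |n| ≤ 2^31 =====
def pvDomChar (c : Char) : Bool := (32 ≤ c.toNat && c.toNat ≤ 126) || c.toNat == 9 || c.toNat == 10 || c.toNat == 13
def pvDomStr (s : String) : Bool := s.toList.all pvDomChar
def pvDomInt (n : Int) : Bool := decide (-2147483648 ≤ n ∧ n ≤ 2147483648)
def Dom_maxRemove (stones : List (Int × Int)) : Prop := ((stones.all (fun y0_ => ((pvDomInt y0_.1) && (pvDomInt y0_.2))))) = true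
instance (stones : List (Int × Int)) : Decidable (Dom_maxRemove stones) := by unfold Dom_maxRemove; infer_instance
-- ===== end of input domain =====

-- B replaces A's path-compressing union-find by a label-repaint partition algorithm
-- (same return value; neither program mutates its argument).

-- ===== PORT A =====
-- Python's recursive `find` with path compression; the Nat fuel only makes the
-- recursion total (stones.length + 1 is enough: proved below, the chains produced by
-- the unions are never longer than the number of unions).  `(p1.get? x).getD x` reads
-- p[x], which is always present at that point (x was just inserted if absent).
def pvFindA : Nat → PySem.Dict Int Int → Int → Int × PySem.Dict Int Int
  | 0, p, x => (x, p)
  | fuel+1, p, x =>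
    let p1 := if p.contains x then p else p.insert x x       -- if x not in p: p[x] = x
    let px := (p1.get? x).getD x                             -- p[x]
    if px = x then (px, p1)
    else
      let rp := pvFindA fuel p1 px                           -- p[x] = find(p[x])
      (rp.1, rp.2.insert x rp.1)                             -- return p[x]

-- p[find(x)] = find(y): Python evaluates the right-hand side find(y) first.
def pvUnionA (fuel : Nat) (p : PySem.Dict Int Int) (x y : Int) : PySem.Dict Int Int :=
  let fy := pvFindA fuel p y
  let fx := pvFindA fuel fy.2 x
  fx.2.insert fx.1 fy.1

def maxRemove (stones : List (Int × Int)) : Int :=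
  let fuel := stones.length + 1
  -- for r, c in stones: union(r, ~c)   (~c = Int.not c)
  let p := stones.foldl (fun p rc => pvUnionA fuel p rc.1 (Int.not rc.2)) ⟨[]⟩
  -- {find(r) for r, c in stones}: the set comprehension's find calls keep mutating p
  let fin := stones.foldl
    (fun (acc : PySem.Set Int × PySem.Dict Int Int) rc =>
      let fr := pvFindA fuel acc.2 rc.1
      (PySem.Set.add acc.1 fr.1, fr.2)) (PySem.Set.empty, p)
  (stones.length : Int) - PySem.Set.len fin.1

-- ===== PORT B =====
-- for k, w in comp.items(): if w == a: comp[k] = b   — each key is read before it can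
-- be written (dict keys are unique), so folding over the items snapshot is exact.
def pvSweep (a b : Int) (items : List (Int × Int)) (d : PySem.Dict Int Int) : PySem.Dict Int Int :=
  items.foldl (fun d kv => if kv.2 = a then d.insert kv.1 b else d) d

def pvStepB (st : PySem.Dict Int Int × Int) (rc : Int × Int) : PySem.Dict Int Int × Int :=
  let u := rc.1
  let v := Int.not rc.2
  match st.1.get? u, st.1.get? v with
  | none, none   => ((st.1.insert u st.2).insert v st.2, st.2 + 1)
  | none, some b => (st.1.insert u b, st.2)
  | some a, none => (st.1.insert v a, st.2)
  | some a, some b => if a ≠ b then (pvSweep a b st.1.items st.1, st.2) else (st.1, st.2)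

def maxRemove_alt (stones : List (Int × Int)) : Int :=
  let st := stones.foldl pvStepB (⟨[]⟩, 0)
  -- {comp[r] for r, c in stones}; comp[r] is always present, so getD's default is never read
  let s := stones.foldl (fun (s : PySem.Set Int) rc => PySem.Set.add s ((st.1.get? rc.1).getD 0)) PySem.Set.empty
  (stones.length : Int) - PySem.Set.len s

-- ===== PRECONDITION & SPEC =====
def Spec_maxRemove (stones : List (Int × Int)) (out : Int) : Prop := out = maxRemove_alt stones
instance (stones : List (Int × Int)) (out : Int) : Decidable (Spec_maxRemove stones out) := by unfold Spec_maxRemove; infer_instance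

-- ===== CLAIM (what is proved, stated in full; the proofs are below) =====
def Claim_equal_maxRemove : Prop := ∀ (stones : List (Int × Int)), Dom_maxRemove stones → Spec_maxRemove stones (maxRemove stones)

-- ===== LEMMAS AND PROOFS =====

-- x is terminal in the parent dict
def pvIsRoot (p : PySem.Dict Int Int) (x : Int) : Prop :=
  p.get? x = none ∨ p.get? x = some x

-- the parent chain from x reaches the root r in n proper steps
inductive pvRootOfN (p : PySem.Dict Int Int) : Int → Int → Nat → Prop
  | root (x : Int) : pvIsRoot p x → pvRootOfN p x x 0
  | step (x y r : Int) (n : Nat) : p.get? x = some y → y ≠ x → pvRootOfN p y r n → pvRootOfN p x r (n+1)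

def pvRootOf (p : PySem.Dict Int Int) (x r : Int) : Prop := ∃ n, pvRootOfN p x r n

def pvSameRoot (p : PySem.Dict Int Int) (a b : Int) : Prop := ∃ r, pvRootOf p a r ∧ pvRootOf p b r

-- every chain reaches a root within B steps
def pvBnd (p : PySem.Dict Int Int) (B : Nat) : Prop := ∀ z, ∃ r n, n ≤ B ∧ pvRootOfN p z r n

-- every parent value is itself a key
def pvPOK (p : PySem.Dict Int Int) : Prop := ∀ z y, p.get? z = some y → p.contains y = true

theorem pv_isRoot_final {p : PySem.Dict Int Int} {x r : Int} {n : Nat}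
    (h : pvRootOfN p x r n) : pvIsRoot p r := by
  induction h with
  | root _ h => exact h
  | step _ _ _ _ _ _ _ ih => exact ih

theorem pv_root_unique {p : PySem.Dict Int Int} {x r s : Int} {n m : Nat}
    (h1 : pvRootOfN p x r n) (h2 : pvRootOfN p x s m) : r = s := by
  induction h1 generalizing s m with
  | root x hx =>
    cases h2 with
    | root => rfl
    | step _ y _ _ hg hne _ =>
      rcases hx with hx | hx <;> rw [hg] at hx <;> simp_all
  | step x y r n hg hne _ ih =>
    cases h2 with
    | root _ hx => rcases hx with hx | hx <;> rw [hg] at hx <;> simp_all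
    | step _ y' _ _ hg' _ h' =>
      rw [hg] at hg'; cases hg'; exact ih h'

theorem pvRootOf_unique {p : PySem.Dict Int Int} {x r s : Int}
    (h1 : pvRootOf p x r) (h2 : pvRootOf p x s) : r = s := by
  obtain ⟨n, h1⟩ := h1; obtain ⟨m, h2⟩ := h2; exact pv_root_unique h1 h2

theorem pvRootOf_self_of_isRoot {p : PySem.Dict Int Int} {x : Int} (h : pvIsRoot p x) :
    pvRootOf p x x := ⟨0, .root x h⟩

theorem pvRootOf_root {p : PySem.Dict Int Int} {x r : Int} (h : pvRootOf p x r) :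
    pvRootOf p r r := by
  obtain ⟨n, h⟩ := h; exact pvRootOf_self_of_isRoot (pv_isRoot_final h)

theorem pv_contains_of_get? {p : PySem.Dict Int Int} {z : Int} {y : Int}
    (h : p.get? z = some y) : p.contains z = true := by
  cases hc : p.contains z
  · rw [(PySem.Dict.get?_eq_none_iff_contains p z).mpr hc] at h; cases h
  · rfl

theorem pv_get?_none_of_not_contains {p : PySem.Dict Int Int} {z : Int}
    (h : ¬ p.contains z = true) : p.get? z = none := by
  cases hc : p.contains z
  · exact (PySem.Dict.get?_eq_none_iff_contains p z).mpr hc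
  · exact absurd hc h

theorem pv_root_contains {p : PySem.Dict Int Int} {z r : Int} {n : Nat}
    (hP : pvPOK p) (h : pvRootOfN p z r n) (hz : p.contains z = true) :
    p.contains r = true := by
  induction h with
  | root => exact hz
  | step x y r n hg _ _ ih => exact ih (hP x y hg)

-- inserting x ↦ x for an absent key changes no chain
theorem pv_insert_self_iff {p : PySem.Dict Int Int} {x : Int} (hx : p.get? x = none)
    (z s : Int) (m : Nat) : pvRootOfN (p.insert x x) z s m ↔ pvRootOfN p z s m := by
  constructor
  · intro h
    induction h with
    | root w hw =>
      refine .root w ?_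
      rcases eq_or_ne w x with rfl | hne
      · exact Or.inl hx
      · simp only [pvIsRoot, PySem.Dict.get?_insert, if_neg hne] at hw
        exact hw
    | step w y s n hg hne _ ih =>
      rcases eq_or_ne w x with rfl | hwx
      · rw [PySem.Dict.get?_insert, if_pos rfl] at hg
        cases hg; exact absurd rfl hne
      · rw [PySem.Dict.get?_insert, if_neg hwx] at hg
        exact .step w y s n hg hne ih
  · intro h
    induction h with
    | root w hw =>
      refine .root w ?_
      rcases eq_or_ne w x with rfl | hne
      · exact Or.inr (by rw [PySem.Dict.get?_insert, if_pos rfl])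
      · simp only [pvIsRoot, PySem.Dict.get?_insert, if_neg hne]
        exact hw
    | step w y s n hg hne _ ih =>
      rcases eq_or_ne w x with rfl | hwx
      · rw [hx] at hg; cases hg
      · exact .step w y s n (by rwa [PySem.Dict.get?_insert, if_neg hwx]) hne ih

-- path compression: rewriting x's parent to its own root changes no root
theorem pv_redirect_fwd {p : PySem.Dict Int Int} {x r : Int}
    (hx : pvRootOf p x r) (hne : r ≠ x) :
    ∀ z s m, pvRootOfN p z s m → ∃ m' ≤ m, pvRootOfN (p.insert x r) z s m' := by
  intro z s m h
  induction h with
  | root w hw =>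
    rcases eq_or_ne w x with rfl | hwx
    · exact absurd (pvRootOf_unique hx (pvRootOf_self_of_isRoot hw)) hne
    · refine ⟨0, le_refl _, .root w ?_⟩
      simp only [pvIsRoot, PySem.Dict.get?_insert, if_neg hwx]
      exact hw
  | step w y s n hg hyne hy ih =>
    rcases eq_or_ne w x with rfl | hwx
    · have hs : s = r := pvRootOf_unique ⟨n+1, .step w y s n hg hyne hy⟩ hx
      subst hs
      have hroot : pvIsRoot (p.insert w s) s := by
        simp only [pvIsRoot, PySem.Dict.get?_insert, if_neg hne]
        exact pv_isRoot_final hy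
      exact ⟨1, by omega, .step w s s 0 (by rw [PySem.Dict.get?_insert, if_pos rfl])
        (by rintro rfl; exact hne rfl) (.root s hroot)⟩
    · obtain ⟨m', hm', h'⟩ := ih
      exact ⟨m'+1, by omega, .step w y s m' (by rwa [PySem.Dict.get?_insert, if_neg hwx]) hyne h'⟩

theorem pv_redirect_bwd {p : PySem.Dict Int Int} {x r : Int}
    (hx : pvRootOf p x r) (hne : r ≠ x) :
    ∀ z s m, pvRootOfN (p.insert x r) z s m → pvRootOf p z s := by
  intro z s m h
  induction h with
  | root w hw =>
    rcases eq_or_ne w x with heq | hwx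
    · subst heq
      simp only [pvIsRoot, PySem.Dict.get?_insert] at hw
      rcases hw with hw | hw
      · cases hw
      · exact absurd (Option.some.inj hw) hne
    · simp only [pvIsRoot, PySem.Dict.get?_insert, if_neg hwx] at hw
      exact pvRootOf_self_of_isRoot hw
  | step w y s n hg hyne hy ih =>
    rcases eq_or_ne w x with heq | hwx
    · subst heq
      rw [PySem.Dict.get?_insert, if_pos rfl] at hg
      have hyr : y = r := (Option.some.inj hg).symm
      subst hyr
      have hs : s = y := pvRootOf_unique ih (pvRootOf_root hx)
      rw [hs]; exact hx
    · rw [PySem.Dict.get?_insert, if_neg hwx] at hg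
      obtain ⟨n', ih⟩ := ih
      exact ⟨n'+1, .step w y s n' hg hyne ih⟩

-- the union insert: link root a under root b
theorem pv_link_fwd {p : PySem.Dict Int Int} {a b : Int}
    (ha : pvIsRoot p a) (hb : pvIsRoot p b) :
    ∀ z s m, pvRootOfN p z s m →
      ∃ m' ≤ m + 1, pvRootOfN (p.insert a b) z (if s = a then b else s) m' := by
  intro z s m h
  induction h with
  | root w hw =>
    rcases eq_or_ne w a with rfl | hwa
    · rw [if_pos rfl]
      rcases eq_or_ne b w with rfl | hba
      · exact ⟨0, by omega, .root b (Or.inr (by rw [PySem.Dict.get?_insert, if_pos rfl]))⟩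
      · have hroot : pvIsRoot (p.insert w b) b := by
          simp only [pvIsRoot, PySem.Dict.get?_insert, if_neg hba]
          exact hb
        exact ⟨1, by omega, .step w b b 0 (by rw [PySem.Dict.get?_insert, if_pos rfl]) hba (.root b hroot)⟩
    · rw [if_neg hwa]
      refine ⟨0, by omega, .root w ?_⟩
      simp only [pvIsRoot, PySem.Dict.get?_insert, if_neg hwa]
      exact hw
  | step w y s n hg hyne hy ih =>
    have hwa : w ≠ a := by
      rintro rfl
      rcases ha with ha | ha <;> rw [hg] at ha
      · cases ha
      · cases ha; exact absurd rfl hyne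
    obtain ⟨m', hm', h'⟩ := ih
    exact ⟨m'+1, by omega, .step w y _ m' (by rwa [PySem.Dict.get?_insert, if_neg hwa]) hyne h'⟩

theorem pv_link_bwd {p : PySem.Dict Int Int} {a b : Int}
    (ha : pvIsRoot p a) (hb : pvIsRoot p b) :
    ∀ z s m, pvRootOfN (p.insert a b) z s m →
      ∃ t, pvRootOf p z t ∧ s = if t = a then b else t := by
  intro z s m h
  induction h with
  | root w hw =>
    rcases eq_or_ne w a with heq | hwa
    · subst heq
      simp only [pvIsRoot, PySem.Dict.get?_insert] at hw
      rcases hw with hw | hw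
      · cases hw
      · exact ⟨w, pvRootOf_self_of_isRoot ha, by simp [(Option.some.inj hw).symm]⟩
    · simp only [pvIsRoot, PySem.Dict.get?_insert, if_neg hwa] at hw
      exact ⟨w, pvRootOf_self_of_isRoot hw, by rw [if_neg hwa]⟩
  | step w y s n hg hyne hy ih =>
    rcases eq_or_ne w a with heq | hwa
    · subst heq
      rw [PySem.Dict.get?_insert, if_pos rfl] at hg
      have hyb : y = b := (Option.some.inj hg).symm
      subst hyb
      obtain ⟨t, ht, hst⟩ := ih
      have hty : t = y := pvRootOf_unique ht (pvRootOf_self_of_isRoot hb)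
      subst hty
      have hba : t ≠ w := by rintro rfl; exact absurd rfl hyne
      rw [if_neg hba] at hst
      exact ⟨w, pvRootOf_self_of_isRoot ha, by simp [hst]⟩
    · rw [PySem.Dict.get?_insert, if_neg hwa] at hg
      obtain ⟨t, ⟨n', ht⟩, hst⟩ := ih
      exact ⟨t, ⟨n'+1, .step w y t n' hg hyne ht⟩, hst⟩

-- small insert helpers
theorem pv_contains_insert_mono {d : PySem.Dict Int Int} {z k v : Int}
    (h : d.contains z = true) : (d.insert k v).contains z = true := by
  rw [PySem.Dict.contains_insert]; simp [h]

theorem pv_contains_insert_self {d : PySem.Dict Int Int} {k v : Int} :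
    (d.insert k v).contains k = true := by
  rw [PySem.Dict.contains_insert]; simp

theorem pv_contains_insert_cases {d : PySem.Dict Int Int} {z k v : Int}
    (h : (d.insert k v).contains z = true) : z = k ∨ d.contains z = true := by
  rw [PySem.Dict.contains_insert] at h; simpa using h

-- ===== the find specification =====
theorem pvFindA_spec : ∀ (fuel : Nat) (p : PySem.Dict Int Int) (x r : Int) (n : Nat),
    pvRootOfN p x r n → n < fuel →
    (pvFindA fuel p x).1 = r ∧
    (∀ z s m, pvRootOfN p z s m → ∃ m' ≤ m, pvRootOfN (pvFindA fuel p x).2 z s m') ∧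
    (∀ z s, pvRootOf (pvFindA fuel p x).2 z s → pvRootOf p z s) ∧
    (∀ z, p.contains z = true → (pvFindA fuel p x).2.contains z = true) ∧
    ((pvFindA fuel p x).2.contains x = true) ∧
    (pvPOK p → (∀ z, (pvFindA fuel p x).2.contains z = true → p.contains z = true ∨ z = x)) ∧
    (pvPOK p → pvPOK (pvFindA fuel p x).2) := by
  intro fuel
  induction fuel with
  | zero => intro p x r n _ hn; omega
  | succ fuel ih =>
    intro p x r n hroot hn
    by_cases hc : p.contains x = true
    · obtain ⟨px, hpx⟩ : ∃ px, p.get? x = some px := by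
        cases hg : p.get? x with
        | none => rw [(PySem.Dict.get?_eq_none_iff_contains p x).mp hg] at hc; cases hc
        | some v => exact ⟨v, rfl⟩
      by_cases hpxx : px = x
      · -- p[x] == x: return (x, p), state unchanged
        rw [hpxx] at hpx
        have heq : pvFindA (fuel+1) p x = (x, p) := by
          simp only [pvFindA, hc, if_true, hpx, Option.getD_some]
        have hrx : r = x :=
          pvRootOf_unique ⟨n, hroot⟩ (pvRootOf_self_of_isRoot (Or.inr hpx))
        rw [heq]
        refine ⟨hrx.symm, fun z s m h => ⟨m, le_refl _, h⟩, fun z s h => h,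
          fun z h => h, hc, fun _ z h => Or.inl h, fun h => h⟩
      · -- recursive case with path compression
        cases hroot with
        | root _ hx =>
          rcases hx with hx | hx <;> rw [hpx] at hx
          · cases hx
          · exact absurd (Option.some.inj hx) hpxx
        | step _ y r n' hg hyne hy =>
          rw [hpx] at hg
          obtain rfl : px = y := Option.some.inj hg
          have hn' : n' < fuel := by omega
          obtain ⟨hv, hfwd, hbwd, hmono, hcx, hrev, hpok⟩ := ih p px r n' hy hn'
          have heq : pvFindA (fuel+1) p x
              = ((pvFindA fuel p px).1, (pvFindA fuel p px).2.insert x (pvFindA fuel p px).1) := by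
            simp only [pvFindA, hc, if_true, hpx, Option.getD_some, if_neg hpxx]
          set rp := pvFindA fuel p px with hrp
          -- r ≠ x
          have hrne : r ≠ x := by
            rintro rfl
            rcases pv_isRoot_final hy with h | h <;> rw [hpx] at h
            · cases h
            · exact hpxx (Option.some.inj h)
          -- x's root in rp.2 is still r
          have hxr2 : pvRootOf rp.2 x r := by
            obtain ⟨m', _, h'⟩ := hfwd x r (n'+1) (.step x px r n' hpx hyne hy)
            exact ⟨m', h'⟩
          rw [heq, hv]
          refine ⟨rfl, ?_, ?_, ?_, ?_, ?_, ?_⟩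
          · intro z s m h
            obtain ⟨m1, hm1, h1⟩ := hfwd z s m h
            obtain ⟨m2, hm2, h2⟩ := pv_redirect_fwd hxr2 hrne z s m1 h1
            exact ⟨m2, le_trans hm2 hm1, h2⟩
          · intro z s h
            obtain ⟨m, h⟩ := h
            exact hbwd z s (pv_redirect_bwd hxr2 hrne z s m h)
          · intro z h
            exact pv_contains_insert_mono (hmono z h)
          · exact pv_contains_insert_self
          · intro hP z h
            rcases pv_contains_insert_cases h with rfl | h
            · exact Or.inr rfl
            · rcases hrev hP z h with h | rfl
              · exact Or.inl h
              · exact Or.inl (hP x _ hpx)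
          · intro hP z w hzw
            by_cases hzx : z = x
            · subst hzx
              rw [PySem.Dict.get?_insert, if_pos rfl] at hzw
              have hw : w = r := (Option.some.inj hzw).symm
              rw [hw]
              exact pv_contains_insert_mono
                (hmono _ (pv_root_contains hP (pvRootOfN.step _ px r n' hpx hyne hy) hc))
            · rw [PySem.Dict.get?_insert, if_neg hzx] at hzw
              exact pv_contains_insert_mono (hpok hP z w hzw)
    · -- x not in p: p[x] = x, return (x, p.insert x x)
      have hnone : p.get? x = none := pv_get?_none_of_not_contains hc
      have hcf : p.contains x = false := by simpa using hc
      have heq : pvFindA (fuel+1) p x = (x, p.insert x x) := by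
        simp [pvFindA, hcf]
      have hrx : r = x := pvRootOf_unique ⟨n, hroot⟩ (pvRootOf_self_of_isRoot (Or.inl hnone))
      rw [heq]
      refine ⟨hrx.symm, ?_, ?_, ?_, pv_contains_insert_self, ?_, ?_⟩
      · intro z s m h
        exact ⟨m, le_refl _, (pv_insert_self_iff hnone z s m).mpr h⟩
      · rintro z s ⟨m, h⟩
        exact ⟨m, (pv_insert_self_iff hnone z s m).mp h⟩
      · intro z h
        exact pv_contains_insert_mono h
      · intro _ z h
        rcases pv_contains_insert_cases h with rfl | h
        · exact Or.inr rfl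
        · exact Or.inl h
      · intro hP z w hzw
        by_cases hzx : z = x
        · subst hzx
          rw [PySem.Dict.get?_insert, if_pos rfl] at hzw
          rw [← Option.some.inj hzw]
          exact pv_contains_insert_self
        · rw [PySem.Dict.get?_insert, if_neg hzx] at hzw
          exact pv_contains_insert_mono (hP z w hzw)

-- ===== the union specification =====
theorem pvUnionA_spec (fuel B : Nat) (p : PySem.Dict Int Int) (u v : Int)
    (hB : pvBnd p B) (hP : pvPOK p) (hf : B < fuel) :
    ∃ ru rv, pvRootOf p u ru ∧ pvRootOf p v rv ∧
      (∀ z s m, pvRootOfN p z s m →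
        ∃ m' ≤ m + 1, pvRootOfN (pvUnionA fuel p u v) z (if s = ru then rv else s) m') ∧
      (∀ z s, pvRootOf (pvUnionA fuel p u v) z s →
        ∃ t, pvRootOf p z t ∧ s = if t = ru then rv else t) ∧
      pvBnd (pvUnionA fuel p u v) (B + 1) ∧
      pvPOK (pvUnionA fuel p u v) ∧
      (∀ z, (pvUnionA fuel p u v).contains z = true ↔ (p.contains z = true ∨ z = u ∨ z = v)) := by
  obtain ⟨rv, nv, hnv, hvd⟩ := hB v
  obtain ⟨hv1, hvfwd, hvbwd, hvmono, hvcx, hvrev, hvpok⟩ :=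
    pvFindA_spec fuel p v rv nv hvd (by omega)
  obtain ⟨ru, nu, hnu, hud⟩ := hB u
  obtain ⟨mu, hmu, hud2⟩ := hvfwd u ru nu hud
  obtain ⟨hu1, hufwd, hubwd, humono, hucx, hurev, hupok⟩ :=
    pvFindA_spec fuel (pvFindA fuel p v).2 u ru mu hud2 (by omega)
  set pA := (pvFindA fuel p v).2 with hpA
  set pB := (pvFindA fuel pA u).2 with hpB
  have hPA : pvPOK pA := hvpok hP
  have hPB : pvPOK pB := hupok hPA
  have hU : pvUnionA fuel p u v = pB.insert ru rv := by
    simp only [pvUnionA]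
    rw [hu1, hv1]
  have hruB : pvRootOf pB u ru := by
    obtain ⟨m, _, h⟩ := hufwd u ru mu hud2; exact ⟨m, h⟩
  have hrvB : pvRootOf pB v rv := by
    obtain ⟨m1, _, h1⟩ := hvfwd v rv nv hvd
    obtain ⟨m2, _, h2⟩ := hufwd v rv m1 h1
    exact ⟨m2, h2⟩
  have hruRoot : pvIsRoot pB ru := by
    obtain ⟨m, h⟩ := pvRootOf_root hruB; exact pv_isRoot_final h
  have hrvRoot : pvIsRoot pB rv := by
    obtain ⟨m, h⟩ := pvRootOf_root hrvB; exact pv_isRoot_final h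
  have hcontu : pB.contains u = true := hucx
  have hcontv : pB.contains v = true := humono v hvcx
  have hcontru : pB.contains ru = true := by
    obtain ⟨m, h⟩ := hruB; exact pv_root_contains hPB h hcontu
  have hcontrv : pB.contains rv = true := by
    obtain ⟨m, h⟩ := hrvB; exact pv_root_contains hPB h hcontv
  have hcontB : ∀ z, pB.contains z = true → p.contains z = true ∨ z = u ∨ z = v := by
    intro z h
    rcases hurev hPA z h with h | rfl
    · rcases hvrev hP z h with h | rfl
      · exact Or.inl h
      · exact Or.inr (Or.inr rfl)
    · exact Or.inr (Or.inl rfl)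
  refine ⟨ru, rv, hvbwd u ru (by exact hubwd u ru hruB), hvbwd v rv (by exact hubwd v rv hrvB), ?_, ?_, ?_, ?_, ?_⟩
  · intro z s m h
    obtain ⟨m1, hm1, h1⟩ := hvfwd z s m h
    obtain ⟨m2, hm2, h2⟩ := hufwd z s m1 h1
    obtain ⟨m3, hm3, h3⟩ := pv_link_fwd hruRoot hrvRoot z s m2 h2
    rw [hU]
    exact ⟨m3, by omega, h3⟩
  · intro z s h
    rw [hU] at h
    obtain ⟨m, h⟩ := h
    obtain ⟨t, ht, hst⟩ := pv_link_bwd hruRoot hrvRoot z s m h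
    exact ⟨t, hvbwd z t (hubwd z t ht), hst⟩
  · intro z
    obtain ⟨r0, n0, hn0, h0⟩ := hB z
    obtain ⟨m1, hm1, h1⟩ := hvfwd z r0 n0 h0
    obtain ⟨m2, hm2, h2⟩ := hufwd z r0 m1 h1
    obtain ⟨m3, hm3, h3⟩ := pv_link_fwd hruRoot hrvRoot z r0 m2 h2
    rw [hU]
    exact ⟨_, m3, by omega, h3⟩
  · rw [hU]
    intro z y hzy
    by_cases hzr : z = ru
    · subst hzr
      rw [PySem.Dict.get?_insert, if_pos rfl] at hzy
      rw [← Option.some.inj hzy]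
      exact pv_contains_insert_mono hcontrv
    · rw [PySem.Dict.get?_insert, if_neg hzr] at hzy
      exact pv_contains_insert_mono (hPB z y hzy)
  · intro z
    rw [hU]
    constructor
    · intro h
      rcases pv_contains_insert_cases h with rfl | h
      · exact hcontB _ hcontru
      · exact hcontB _ h
    · rintro (h | rfl | rfl)
      · exact pv_contains_insert_mono (humono z (hvmono z h))
      · exact pv_contains_insert_mono hcontu
      · exact pv_contains_insert_mono hcontv

-- ===== B-side dictionary lemmas =====
theorem pv_contains_iff_get? {d : PySem.Dict Int Int} {z : Int} :
    d.contains z = true ↔ d.get? z ≠ none := by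
  cases hc : d.contains z
  · simp [(PySem.Dict.get?_eq_none_iff_contains d z).mpr hc]
  · simp only [iff_true_left]
    intro hn
    rw [(PySem.Dict.get?_eq_none_iff_contains d z).mp hn] at hc
    cases hc

theorem pv_mem_items_of_get? {d : PySem.Dict Int Int} {z a : Int}
    (h : d.get? z = some a) : (z, a) ∈ d.items := by
  unfold PySem.Dict.get? at h
  cases hf : List.find? (fun p => p.1 == z) d.items with
  | none => rw [hf] at h; cases h
  | some q =>
    rw [hf] at h
    have hq : q.1 = z := by simpa using List.find?_some hf
    have ha : q.2 = a := by simpa using h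
    have hmem := List.mem_of_find?_eq_some hf
    obtain ⟨q1, q2⟩ := q
    simp only at hq ha
    rw [hq, ha] at hmem
    exact hmem

theorem pv_sweep_get? (a b : Int) :
    ∀ (l : List (Int × Int)) (d : PySem.Dict Int Int), (l.map Prod.fst).Nodup →
      ∀ z, (pvSweep a b l d).get? z = if (z, a) ∈ l then some b else d.get? z := by
  intro l
  induction l with
  | nil => intro d _ z; simp [pvSweep]
  | cons kv t ihl =>
    intro d hnd z
    obtain ⟨k, w⟩ := kv
    rw [List.map_cons, List.nodup_cons] at hnd
    have hstep : pvSweep a b ((k, w) :: t) d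
        = pvSweep a b t (if w = a then d.insert k b else d) := by
      simp [pvSweep]
    by_cases hw : w = a
    · subst hw
      rw [hstep, if_pos rfl, ihl _ hnd.2 z]
      by_cases hzt : (z, w) ∈ t
      · rw [if_pos hzt, if_pos (List.mem_cons_of_mem _ hzt)]
      · rw [if_neg hzt]
        by_cases hzk : z = k
        · subst hzk
          rw [if_pos (List.mem_cons_self), PySem.Dict.get?_insert, if_pos rfl]
        · rw [PySem.Dict.get?_insert, if_neg hzk, if_neg ?_]
          simp only [List.mem_cons, not_or]
          exact ⟨by simp [hzk], hzt⟩
    · rw [hstep, if_neg hw, ihl _ hnd.2 z]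
      have hiff : ((z, a) ∈ (k, w) :: t) ↔ (z, a) ∈ t := by
        simp only [List.mem_cons, Prod.mk.injEq]
        constructor
        · rintro (⟨rfl, rfl⟩ | h)
          · exact absurd rfl hw
          · exact h
        · exact Or.inr
      by_cases hz : (z, a) ∈ t
      · rw [if_pos hz, if_pos (hiff.mpr hz)]
      · rw [if_neg hz, if_neg (fun hmem => hz (hiff.mp hmem))]

theorem pv_sweep_nodup (a b : Int) :
    ∀ (l : List (Int × Int)) (d : PySem.Dict Int Int), d.keys.Nodup →
      (pvSweep a b l d).keys.Nodup := by
  intro l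
  induction l with
  | nil => intro d h; exact h
  | cons kv t ihl =>
    intro d h
    have hstep : pvSweep a b (kv :: t) d
        = pvSweep a b t (if kv.2 = a then d.insert kv.1 b else d) := by
      simp [pvSweep]
    rw [hstep]
    by_cases hw : kv.2 = a
    · rw [if_pos hw]; exact ihl _ (PySem.Dict.nodup_keys_insert d kv.1 b h)
    · rw [if_neg hw]; exact ihl _ h

theorem pv_contains_insert_iff {d : PySem.Dict Int Int} {k v z : Int} :
    (d.insert k v).contains z = true ↔ (z = k ∨ d.contains z = true) := by
  rw [PySem.Dict.contains_insert]; simp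

theorem pv_get?_some_of_contains {d : PySem.Dict Int Int} {z : Int}
    (h : d.contains z = true) : ∃ l, d.get? z = some l := by
  cases hg : d.get? z with
  | none => exact absurd hg (pv_contains_iff_get?.mp h)
  | some l => exact ⟨l, rfl⟩

theorem pvSameRoot_iff_roots {p : PySem.Dict Int Int} {a b ta tb : Int}
    (hta : pvRootOf p a ta) (htb : pvRootOf p b tb) :
    pvSameRoot p a b ↔ ta = tb :=
  ⟨fun ⟨_, x1, x2⟩ => (pvRootOf_unique hta x1).trans (pvRootOf_unique x2 htb),
   fun h => ⟨ta, hta, h ▸ htb⟩⟩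

-- ===== the simulation invariant =====
def pvInv (pre : List (Int × Int)) (p comp : PySem.Dict Int Int) (nxt : Int) : Prop :=
  pvBnd p pre.length ∧ pvPOK p ∧
  (∀ z, p.contains z = true ↔ comp.contains z = true) ∧
  (∀ rc ∈ pre, comp.contains rc.1 = true ∧ comp.contains (Int.not rc.2) = true) ∧
  comp.keys.Nodup ∧
  (∀ z l, comp.get? z = some l → l < nxt) ∧
  (∀ a b, p.contains a = true → p.contains b = true →
    (pvSameRoot p a b ↔ comp.get? a = comp.get? b))

theorem pvStep_sim (fuel : Nat) (pre : List (Int × Int)) (p comp : PySem.Dict Int Int)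
    (nxt : Int) (rc : Int × Int) (hInv : pvInv pre p comp nxt) (hf : pre.length < fuel) :
    pvInv (pre ++ [rc]) (pvUnionA fuel p rc.1 (Int.not rc.2))
      (pvStepB (comp, nxt) rc).1 (pvStepB (comp, nxt) rc).2 := by
  obtain ⟨hBnd, hPOK, hkeys, hpre, hnd, hlab, hpart⟩ := hInv
  obtain ⟨ru, rv, hru, hrv, hfwd, hbwd, hBnd', hPOK', hcont'⟩ :=
    pvUnionA_spec fuel pre.length p rc.1 (Int.not rc.2) hBnd hPOK hf
  set u := rc.1 with hu_def
  set v := Int.not rc.2 with hv_def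
  set p' := pvUnionA fuel p u v with hp'_def
  have hfwd1 : ∀ z t, pvRootOf p z t → pvRootOf p' z (if t = ru then rv else t) := by
    rintro z t ⟨m, h⟩
    obtain ⟨m', _, h'⟩ := hfwd z t m h
    exact ⟨m', h'⟩
  have hsame' : ∀ a b ta tb, pvRootOf p a ta → pvRootOf p b tb →
      (pvSameRoot p' a b ↔ (if ta = ru then rv else ta) = (if tb = ru then rv else tb)) := by
    intro a b ta tb hta htb
    constructor
    · rintro ⟨r, h1, h2⟩
      rw [← pvRootOf_unique h1 (hfwd1 a ta hta), ← pvRootOf_unique h2 (hfwd1 b tb htb)]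
    · intro h
      exact ⟨_, hfwd1 a ta hta, by rw [h]; exact hfwd1 b tb htb⟩
  have hsame : ∀ a b ta tb, pvRootOf p a ta → pvRootOf p b tb →
      (pvSameRoot p a b ↔ ta = tb) := by
    intro a b ta tb hta htb
    constructor
    · rintro ⟨r, h1, h2⟩
      rw [← pvRootOf_unique h1 hta, ← pvRootOf_unique h2 htb]
    · intro h
      exact ⟨ta, hta, by rw [h]; exact htb⟩
  have hnokey_root : ∀ z, ¬ p.contains z = true → pvRootOf p z z := fun z h =>
    pvRootOf_self_of_isRoot (Or.inl (pv_get?_none_of_not_contains h))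
  have hkeyroot : ∀ a ta, p.contains a = true → pvRootOf p a ta → p.contains ta = true := by
    rintro a ta ha ⟨m, h⟩
    exact pv_root_contains hPOK h ha
  have hgetc_none : ∀ z, comp.get? z = none → ¬ p.contains z = true := by
    intro z hz hp
    exact pv_contains_iff_get?.mp ((hkeys z).mp hp) hz
  have hgetc_some : ∀ z l, comp.get? z = some l → p.contains z = true := by
    intro z l hz
    exact (hkeys z).mpr (pv_contains_of_get? hz)
  have hlen : (pre ++ [rc]).length = pre.length + 1 := by simp
  -- root of any key of p is a key, hence differs from any non-key
  cases hu : comp.get? u with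
  | none =>
    cases hv : comp.get? v with
    | none =>
      -- both nodes fresh: one new component, fresh label nxt
      have hB : pvStepB (comp, nxt) rc = ((comp.insert u nxt).insert v nxt, nxt + 1) := by
        simp only [pvStepB, ← hu_def, ← hv_def, hu, hv]
      rw [hB]
      simp only [pvInv, hlen]
      have hpu : ¬ p.contains u = true := hgetc_none u hu
      have hpv : ¬ p.contains v = true := hgetc_none v hv
      have hruu : ru = u := pvRootOf_unique hru (hnokey_root u hpu)
      have hrvv : rv = v := pvRootOf_unique hrv (hnokey_root v hpv)
      have hget' : ∀ z, ((comp.insert u nxt).insert v nxt).get? z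
          = if z = v then some nxt else if z = u then some nxt else comp.get? z := by
        intro z
        rw [PySem.Dict.get?_insert, PySem.Dict.get?_insert]
      have hcontc' : ∀ z, ((comp.insert u nxt).insert v nxt).contains z = true
          ↔ (z = v ∨ z = u ∨ comp.contains z = true) := by
        intro z
        rw [pv_contains_insert_iff, pv_contains_insert_iff]
      -- the new roots of u and v are both v
      have hrootu' : pvRootOf p' u v := by
        have := hfwd1 u u (hnokey_root u hpu)
        rw [hruu] at this
        simpa [hrvv] using this
      have hrootv' : pvRootOf p' v v := by
        have := hfwd1 v v (hnokey_root v hpv)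
        rw [hruu] at this
        by_cases hvu : v = u
        · simpa [hvu, hrvv] using this
        · simpa [hvu, hrvv] using this
      -- old keys keep their old roots
      have holdroot : ∀ a ta, p.contains a = true → pvRootOf p a ta → pvRootOf p' a ta ∧
          ta ≠ u ∧ ta ≠ v := by
        intro a ta ha hta
        have hcta := hkeyroot a ta ha hta
        have htau : ta ≠ u := fun h => hpu (h ▸ hcta)
        have htav : ta ≠ v := fun h => hpv (h ▸ hcta)
        have := hfwd1 a ta hta
        rw [hruu, if_neg htau] at this
        exact ⟨this, htau, htav⟩
      refine ⟨hBnd', hPOK', ?_, ?_, ?_, ?_, ?_⟩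
      · intro z
        rw [hcont' z, hcontc' z, hkeys z]
        tauto
      · intro rc' hrc'
        rcases List.mem_append.mp hrc' with h | h
        · obtain ⟨h1, h2⟩ := hpre rc' h
          exact ⟨pv_contains_insert_mono (pv_contains_insert_mono h1),
                 pv_contains_insert_mono (pv_contains_insert_mono h2)⟩
        · rw [List.mem_singleton.mp h]
          exact ⟨(hcontc' u).mpr (Or.inr (Or.inl rfl)), (hcontc' v).mpr (Or.inl rfl)⟩
      · exact PySem.Dict.nodup_keys_insert _ _ _ (PySem.Dict.nodup_keys_insert _ _ _ hnd)
      · intro z l hz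
        rw [hget' z] at hz
        split_ifs at hz
        · injection hz with h; omega
        · injection hz with h; omega
        · have := hlab z l hz; omega
      · -- partition matching
        intro a b ha' hb'
        -- analyse each side: old key, or one of u, v
        have hchar : ∀ c, p'.contains c = true →
            ∃ tc, pvRootOf p' c tc ∧
              (((comp.insert u nxt).insert v nxt).get? c = some nxt → tc = v) ∧
              (∀ l, ((comp.insert u nxt).insert v nxt).get? c = some l → l ≠ nxt →
                 p.contains c = true ∧ pvRootOf p c tc ∧ tc ≠ u ∧ tc ≠ v ∧
                 comp.get? c = some l) := by
          intro c hc
          rcases (hcont' c).mp hc with hcp | rfl | rfl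
          · obtain ⟨tc, nc, _, htcN⟩ := hBnd c
            have htc : pvRootOf p c tc := ⟨nc, htcN⟩
            obtain ⟨h1, h2, h3⟩ := holdroot c tc hcp htc
            have hcu : c ≠ u := fun h => hpu (h ▸ hcp)
            have hcv : c ≠ v := fun h => hpv (h ▸ hcp)
            refine ⟨tc, h1, ?_, ?_⟩
            · intro hg
              rw [hget' c, if_neg hcv, if_neg hcu] at hg
              exact absurd (hlab c nxt hg) (by omega)
            · intro l hg _
              rw [hget' c, if_neg hcv, if_neg hcu] at hg
              exact ⟨hcp, htc, h2, h3, hg⟩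
          · refine ⟨v, hrootu', fun _ => rfl, ?_⟩
            intro l hg hl
            rw [hget' u] at hg
            split_ifs at hg
            all_goals (cases hg; exact absurd rfl hl)
          · refine ⟨v, hrootv', fun _ => rfl, ?_⟩
            intro l hg hl
            rw [hget' v, if_pos rfl] at hg
            cases hg; exact absurd rfl hl
        obtain ⟨ta, hta', hta1, hta2⟩ := hchar a ha'
        obtain ⟨tb, htb', htb1, htb2⟩ := hchar b hb'
        have hca : ((comp.insert u nxt).insert v nxt).contains a = true := by
          refine (hcontc' a).mpr ?_
          rcases (hcont' a).mp ha' with h | rfl | rfl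
          · exact Or.inr (Or.inr ((hkeys a).mp h))
          · exact Or.inr (Or.inl rfl)
          · exact Or.inl rfl
        have hcb : ((comp.insert u nxt).insert v nxt).contains b = true := by
          refine (hcontc' b).mpr ?_
          rcases (hcont' b).mp hb' with h | rfl | rfl
          · exact Or.inr (Or.inr ((hkeys b).mp h))
          · exact Or.inr (Or.inl rfl)
          · exact Or.inl rfl
        obtain ⟨la, hla⟩ := pv_get?_some_of_contains hca
        obtain ⟨lb, hlb⟩ := pv_get?_some_of_contains hcb
        rw [hla, hlb]
        by_cases hlan : la = nxt <;> by_cases hlbn : lb = nxt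
        · -- both carry the fresh label: both roots are v
          have h1 : ta = v := hta1 (by rw [hla, hlan])
          have h2 : tb = v := htb1 (by rw [hlb, hlbn])
          constructor
          · intro _; rw [hlan, hlbn]
          · intro _; exact ⟨v, h1 ▸ hta', h2 ▸ htb'⟩
        · have h1 : ta = v := hta1 (by rw [hla, hlan])
          obtain ⟨_, _, _, h4, _⟩ := htb2 lb hlb hlbn
          constructor
          · rintro ⟨r, x1, x2⟩
            have : ta = tb := (pvRootOf_unique hta' x1).trans (pvRootOf_unique x2 htb')
            exact absurd (this ▸ h1.symm).symm h4
          · intro h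
            exact absurd ((Option.some.inj h).symm.trans hlan) hlbn
        · have h2 : tb = v := htb1 (by rw [hlb, hlbn])
          obtain ⟨_, _, _, h4, _⟩ := hta2 la hla hlan
          constructor
          · rintro ⟨r, x1, x2⟩
            have : ta = tb := (pvRootOf_unique hta' x1).trans (pvRootOf_unique x2 htb')
            exact absurd (this.symm ▸ h2.symm).symm h4
          · intro h
            exact absurd ((Option.some.inj h).trans hlbn) hlan
        · obtain ⟨hap, htaP, _, _, hgca⟩ := hta2 la hla hlan
          obtain ⟨hbp, htbP, _, _, hgcb⟩ := htb2 lb hlb hlbn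
          have h1 : pvSameRoot p' a b ↔ ta = tb := by
            constructor
            · rintro ⟨r, x1, x2⟩
              exact (pvRootOf_unique hta' x1).trans (pvRootOf_unique x2 htb')
            · intro h; exact ⟨ta, hta', h ▸ htb'⟩
          rw [h1, ← hsame a b ta tb htaP htbP, hpart a b hap hbp, hgca, hgcb]
    | some lb =>
      -- u fresh, v already labelled: u joins v's component / label
      have hB : pvStepB (comp, nxt) rc = (comp.insert u lb, nxt) := by
        simp only [pvStepB, ← hu_def, ← hv_def, hu, hv]
      rw [hB]
      simp only [pvInv, hlen]
      have hpu : ¬ p.contains u = true := hgetc_none u hu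
      have hpv : p.contains v = true := hgetc_some v lb hv
      have hcv : comp.contains v = true := pv_contains_of_get? hv
      have hruu : ru = u := pvRootOf_unique hru (hnokey_root u hpu)
      have hget' : ∀ z, (comp.insert u lb).get? z = if z = u then some lb else comp.get? z := by
        intro z; rw [PySem.Dict.get?_insert]
      -- root of u in p' is rv; old keys keep their roots
      have hrootu' : pvRootOf p' u rv := by
        have := hfwd1 u u (hnokey_root u hpu)
        rw [hruu] at this
        simpa using this
      have holdroot : ∀ a ta, p.contains a = true → pvRootOf p a ta →
          pvRootOf p' a ta ∧ a ≠ u := by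
        intro a ta ha hta
        have hcta := hkeyroot a ta ha hta
        have htau : ta ≠ u := fun h => hpu (h ▸ hcta)
        have := hfwd1 a ta hta
        rw [hruu, if_neg htau] at this
        exact ⟨this, fun h => hpu (h ▸ ha)⟩
      refine ⟨hBnd', hPOK', ?_, ?_, ?_, ?_, ?_⟩
      · intro z
        rw [hcont' z, pv_contains_insert_iff]
        constructor
        · rintro (h | rfl | rfl)
          · exact Or.inr ((hkeys z).mp h)
          · exact Or.inl rfl
          · exact Or.inr hcv
        · rintro (rfl | h)
          · exact Or.inr (Or.inl rfl)
          · exact Or.inl ((hkeys z).mpr h)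
      · intro rc' hrc'
        rcases List.mem_append.mp hrc' with h | h
        · obtain ⟨h1, h2⟩ := hpre rc' h
          exact ⟨pv_contains_insert_mono h1, pv_contains_insert_mono h2⟩
        · rw [List.mem_singleton.mp h]
          exact ⟨pv_contains_insert_self, pv_contains_insert_mono hcv⟩
      · exact PySem.Dict.nodup_keys_insert _ _ _ hnd
      · intro z l hz
        rw [hget' z] at hz
        split_ifs at hz
        · injection hz with h; rw [← h]; exact hlab v lb hv
        · exact hlab z l hz
      · intro a b ha' hb'
        have hchar : ∀ c, p'.contains c = true →
            ∃ tc, pvRootOf p' c tc ∧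
              ((c = u ∧ tc = rv) ∨
               (p.contains c = true ∧ pvRootOf p c tc ∧ c ≠ u)) := by
          intro c hc
          rcases (hcont' c).mp hc with hcp | rfl | rfl
          · obtain ⟨tc, nc, _, htcN⟩ := hBnd c
            have htc : pvRootOf p c tc := ⟨nc, htcN⟩
            obtain ⟨h1, h2⟩ := holdroot c tc hcp htc
            exact ⟨tc, h1, Or.inr ⟨hcp, htc, h2⟩⟩
          · exact ⟨rv, hrootu', Or.inl ⟨rfl, rfl⟩⟩
          · obtain ⟨tc, nc, _, htcN⟩ := hBnd v
            have htc : pvRootOf p v tc := ⟨nc, htcN⟩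
            obtain ⟨h1, h2⟩ := holdroot v tc hpv htc
            exact ⟨tc, h1, Or.inr ⟨hpv, htc, h2⟩⟩
        obtain ⟨ta, hta', hcasea⟩ := hchar a ha'
        obtain ⟨tb, htb', hcaseb⟩ := hchar b hb'
        rw [pvSameRoot_iff_roots hta' htb']
        rcases hcasea with ⟨rfl, rfl⟩ | ⟨hap, htaP, hau⟩
        · rcases hcaseb with ⟨rfl, rfl⟩ | ⟨hbp, htbP, hbu⟩
          · simp
          · -- a = u fresh, b old: tb = rv ↔ labels match
            rw [hget' u, if_pos rfl, hget' b, if_neg hbu]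
            constructor
            · intro h
              rw [← hv]
              exact ((hpart b v hbp hpv).mp ((pvSameRoot_iff_roots htbP hrv).mpr h.symm)).symm
            · intro h
              have hbv2 : comp.get? b = comp.get? v := by rw [hv, ← h]
              exact ((pvSameRoot_iff_roots htbP hrv).mp ((hpart b v hbp hpv).mpr hbv2)).symm
        · rcases hcaseb with ⟨rfl, rfl⟩ | ⟨hbp, htbP, hbu⟩
          · rw [hget' a, if_neg hau, hget' u, if_pos rfl]
            constructor
            · intro h
              rw [← hv]
              exact (hpart a v hap hpv).mp ((pvSameRoot_iff_roots htaP hrv).mpr h)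
            · intro h
              exact (pvSameRoot_iff_roots htaP hrv).mp
                ((hpart a v hap hpv).mpr (by rw [h, hv]))
          · rw [hget' a, if_neg hau, hget' b, if_neg hbu]
            rw [← hpart a b hap hbp]
            exact (pvSameRoot_iff_roots htaP htbP).symm
  | some la =>
    cases hv : comp.get? v with
    | none =>
      -- v fresh, u already labelled: v joins u's component / label
      have hB : pvStepB (comp, nxt) rc = (comp.insert v la, nxt) := by
        simp only [pvStepB, ← hu_def, ← hv_def, hu, hv]
      rw [hB]
      simp only [pvInv, hlen]
      have hpv : ¬ p.contains v = true := hgetc_none v hv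
      have hpu' : p.contains u = true := hgetc_some u la hu
      have hcu : comp.contains u = true := pv_contains_of_get? hu
      have hrvv : rv = v := pvRootOf_unique hrv (hnokey_root v hpv)
      have hget' : ∀ z, (comp.insert v la).get? z = if z = v then some la else comp.get? z := by
        intro z; rw [PySem.Dict.get?_insert]
      have hcru : p.contains ru = true := hkeyroot u ru hpu' hru
      have hruv : ru ≠ v := fun h => hpv (h ▸ hcru)
      -- root of v in p' is v; old keys get root (if ta = ru then v else ta)
      have hrootv' : pvRootOf p' v v := by
        have := hfwd1 v v (hnokey_root v hpv)
        rw [if_neg (fun h => hruv h.symm)] at this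
        exact this
      have holdroot : ∀ a ta, p.contains a = true → pvRootOf p a ta →
          pvRootOf p' a (if ta = ru then v else ta) ∧ a ≠ v ∧ ta ≠ v := by
        intro a ta ha hta
        have hcta := hkeyroot a ta ha hta
        have htav : ta ≠ v := fun h => hpv (h ▸ hcta)
        have := hfwd1 a ta hta
        rw [hrvv] at this
        exact ⟨this, fun h => hpv (h ▸ ha), htav⟩
      refine ⟨hBnd', hPOK', ?_, ?_, ?_, ?_, ?_⟩
      · intro z
        rw [hcont' z, pv_contains_insert_iff]
        constructor
        · rintro (h | rfl | rfl)
          · exact Or.inr ((hkeys z).mp h)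
          · exact Or.inr hcu
          · exact Or.inl rfl
        · rintro (rfl | h)
          · exact Or.inr (Or.inr rfl)
          · exact Or.inl ((hkeys z).mpr h)
      · intro rc' hrc'
        rcases List.mem_append.mp hrc' with h | h
        · obtain ⟨h1, h2⟩ := hpre rc' h
          exact ⟨pv_contains_insert_mono h1, pv_contains_insert_mono h2⟩
        · rw [List.mem_singleton.mp h]
          exact ⟨pv_contains_insert_mono hcu, pv_contains_insert_self⟩
      · exact PySem.Dict.nodup_keys_insert _ _ _ hnd
      · intro z l hz
        rw [hget' z] at hz
        split_ifs at hz
        · injection hz with h; rw [← h]; exact hlab u la hu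
        · exact hlab z l hz
      · intro a b ha' hb'
        have hchar : ∀ c, p'.contains c = true →
            ∃ tc, pvRootOf p' c tc ∧
              ((c = v ∧ tc = v) ∨
               (p.contains c = true ∧ c ≠ v ∧
                 ∃ sc, pvRootOf p c sc ∧ sc ≠ v ∧ tc = (if sc = ru then v else sc))) := by
          intro c hc
          rcases (hcont' c).mp hc with hcp | rfl | rfl
          · obtain ⟨sc, nc, _, htcN⟩ := hBnd c
            have htc : pvRootOf p c sc := ⟨nc, htcN⟩
            obtain ⟨h1, h2, h3⟩ := holdroot c sc hcp htc
            exact ⟨_, h1, Or.inr ⟨hcp, h2, sc, htc, h3, rfl⟩⟩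
          · obtain ⟨sc, nc, _, htcN⟩ := hBnd u
            have htc : pvRootOf p u sc := ⟨nc, htcN⟩
            obtain ⟨h1, h2, h3⟩ := holdroot u sc hpu' htc
            exact ⟨_, h1, Or.inr ⟨hpu', h2, sc, htc, h3, rfl⟩⟩
          · exact ⟨v, hrootv', Or.inl ⟨rfl, rfl⟩⟩
        obtain ⟨ta, hta', hcasea⟩ := hchar a ha'
        obtain ⟨tb, htb', hcaseb⟩ := hchar b hb'
        rw [pvSameRoot_iff_roots hta' htb']
        rcases hcasea with ⟨rfl, rfl⟩ | ⟨hap, hav, sa, hsa, hsav, rfl⟩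
        · rcases hcaseb with ⟨rfl, rfl⟩ | ⟨hbp, hbv, sb, hsb, hsbv, rfl⟩
          · simp
          · -- a = v fresh, b old
            rw [hget' v, if_pos rfl, hget' b, if_neg hbv]
            have hkey : (v = if sb = ru then v else sb) ↔ sb = ru := by
              constructor
              · intro h
                by_cases hc2 : sb = ru
                · exact hc2
                · rw [if_neg hc2] at h; exact absurd h.symm hsbv
              · intro h; rw [if_pos h]
            rw [hkey, ← pvSameRoot_iff_roots hsb hru, hpart b u hbp hpu', hu]
            exact eq_comm
        · rcases hcaseb with ⟨rfl, rfl⟩ | ⟨hbp, hbv, sb, hsb, hsbv, rfl⟩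
          · -- a old, b = v fresh
            rw [hget' a, if_neg hav, hget' v, if_pos rfl]
            have hkey : ((if sa = ru then v else sa) = v) ↔ sa = ru := by
              constructor
              · intro h
                by_cases hc2 : sa = ru
                · exact hc2
                · rw [if_neg hc2] at h; exact absurd h hsav
              · intro h; rw [if_pos h]
            rw [hkey, ← pvSameRoot_iff_roots hsa hru, hpart a u hap hpu', hu]
          · -- both old
            rw [hget' a, if_neg hav, hget' b, if_neg hbv, ← hpart a b hap hbp,
              pvSameRoot_iff_roots hsa hsb]
            constructor
            · intro h
              by_cases h1 : sa = ru <;> by_cases h2 : sb = ru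
              · rw [h1, h2]
              · rw [if_pos h1, if_neg h2] at h; exact absurd h.symm hsbv
              · rw [if_neg h1, if_pos h2] at h; exact absurd h hsav
              · rwa [if_neg h1, if_neg h2] at h
            · intro h; rw [h]
    | some lb =>
      have hpu' : p.contains u = true := hgetc_some u la hu
      have hpv' : p.contains v = true := hgetc_some v lb hv
      have hcu : comp.contains u = true := pv_contains_of_get? hu
      have hcv : comp.contains v = true := pv_contains_of_get? hv
      by_cases hab : la = lb
      · -- labels already equal: the two nodes are already in one component, no change
        subst hab
        have hB : pvStepB (comp, nxt) rc = (comp, nxt) := by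
          simp only [pvStepB, ← hu_def, ← hv_def, hu, hv]
          rw [if_neg (by simp)]
        rw [hB]
        simp only [pvInv, hlen]
        have hrr : rv = ru := by
          have hsr : pvSameRoot p u v := (hpart u v hpu' hpv').mpr (by rw [hu, hv])
          exact ((pvSameRoot_iff_roots hru hrv).mp hsr).symm
        have hfwd1' : ∀ z t, pvRootOf p z t → pvRootOf p' z t := by
          intro z t h
          have h2 := hfwd1 z t h
          have hid : (if t = ru then rv else t) = t := by
            rw [hrr]; split_ifs with h3
            · exact h3.symm
            · rfl
          rwa [hid] at h2
        refine ⟨hBnd', hPOK', ?_, ?_, hnd, hlab, ?_⟩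
        · intro z
          rw [hcont' z]
          constructor
          · rintro (h | rfl | rfl)
            · exact (hkeys z).mp h
            · exact hcu
            · exact hcv
          · intro h; exact Or.inl ((hkeys z).mpr h)
        · intro rc' hrc'
          rcases List.mem_append.mp hrc' with h | h
          · exact hpre rc' h
          · rw [List.mem_singleton.mp h]; exact ⟨hcu, hcv⟩
        · intro a b ha' hb'
          have hap : p.contains a = true := by
            rcases (hcont' a).mp ha' with h | rfl | rfl
            · exact h
            · exact hpu'
            · exact hpv'
          have hbp : p.contains b = true := by
            rcases (hcont' b).mp hb' with h | rfl | rfl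
            · exact h
            · exact hpu'
            · exact hpv'
          obtain ⟨ta, na, _, htaN⟩ := hBnd a
          obtain ⟨tb, nb, _, htbN⟩ := hBnd b
          have hta : pvRootOf p a ta := ⟨na, htaN⟩
          have htb : pvRootOf p b tb := ⟨nb, htbN⟩
          rw [pvSameRoot_iff_roots (hfwd1' a ta hta) (hfwd1' b tb htb),
            ← pvSameRoot_iff_roots hta htb]
          exact hpart a b hap hbp
      · -- labels differ: A links root(u) under root(v), B repaints label la to lb
        have hB : pvStepB (comp, nxt) rc = (pvSweep la lb comp.items comp, nxt) := by
          simp only [pvStepB, ← hu_def, ← hv_def, hu, hv]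
          rw [if_pos hab]
        rw [hB]
        simp only [pvInv, hlen]
        have hndfst : (comp.items.map Prod.fst).Nodup := hnd
        have hmemiff : ∀ z, ((z, la) ∈ comp.items) ↔ comp.get? z = some la := by
          intro z
          exact ⟨fun h => PySem.Dict.get?_of_mem_items comp h hnd, fun h => pv_mem_items_of_get? h⟩
        have hget' : ∀ z, (pvSweep la lb comp.items comp).get? z
            = if comp.get? z = some la then some lb else comp.get? z := by
          intro z
          rw [pv_sweep_get? la lb comp.items comp hndfst z, if_congr (hmemiff z) rfl rfl]
        have hrur : ru ≠ rv := by
          intro h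
          have h2 := (hpart u v hpu' hpv').mp ((pvSameRoot_iff_roots hru hrv).mpr h)
          rw [hu, hv] at h2
          exact hab (Option.some.inj h2)
        have hcontiff : ∀ z, (pvSweep la lb comp.items comp).contains z = true
            ↔ comp.contains z = true := by
          intro z
          rw [pv_contains_iff_get?, pv_contains_iff_get?, hget' z]
          split_ifs with h
          · simp [h]
          · exact Iff.rfl
        refine ⟨hBnd', hPOK', ?_, ?_, pv_sweep_nodup la lb comp.items comp hnd, ?_, ?_⟩
        · intro z
          rw [hcont' z, hcontiff z]
          constructor
          · rintro (h | rfl | rfl)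
            · exact (hkeys z).mp h
            · exact hcu
            · exact hcv
          · intro h; exact Or.inl ((hkeys z).mpr h)
        · intro rc' hrc'
          rcases List.mem_append.mp hrc' with h | h
          · obtain ⟨h1, h2⟩ := hpre rc' h
            exact ⟨(hcontiff _).mpr h1, (hcontiff _).mpr h2⟩
          · rw [List.mem_singleton.mp h]
            exact ⟨(hcontiff u).mpr hcu, (hcontiff v).mpr hcv⟩
        · intro z l hz
          rw [hget' z] at hz
          split_ifs at hz with h
          · injection hz with h2; rw [← h2]; exact hlab v lb hv
          · exact hlab z l hz
        · intro a b ha' hb'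
          have hap : p.contains a = true := by
            rcases (hcont' a).mp ha' with h | rfl | rfl
            · exact h
            · exact hpu'
            · exact hpv'
          have hbp : p.contains b = true := by
            rcases (hcont' b).mp hb' with h | rfl | rfl
            · exact h
            · exact hpu'
            · exact hpv'
          obtain ⟨ta, na, _, htaN⟩ := hBnd a
          obtain ⟨tb, nb, _, htbN⟩ := hBnd b
          have hta : pvRootOf p a ta := ⟨na, htaN⟩
          have htb : pvRootOf p b tb := ⟨nb, htbN⟩
          obtain ⟨l1, hl1⟩ := pv_get?_some_of_contains ((hkeys a).mp hap)
          obtain ⟨l2, hl2⟩ := pv_get?_some_of_contains ((hkeys b).mp hbp)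
          have hcharA : ∀ (c tc lc : Int), p.contains c = true → pvRootOf p c tc →
              comp.get? c = some lc → ((tc = ru) ↔ (lc = la)) ∧ ((tc = rv) ↔ (lc = lb)) := by
            intro c tc lc hcp htc hgc
            constructor
            · rw [← pvSameRoot_iff_roots htc hru, hpart c u hcp hpu', hgc, hu]
              exact ⟨fun h => Option.some.inj h, fun h => by rw [h]⟩
            · rw [← pvSameRoot_iff_roots htc hrv, hpart c v hcp hpv', hgc, hv]
              exact ⟨fun h => Option.some.inj h, fun h => by rw [h]⟩
          obtain ⟨ha1, ha2⟩ := hcharA a ta l1 hap hta hl1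
          obtain ⟨hb1, hb2⟩ := hcharA b tb l2 hbp htb hl2
          have hab12 : (ta = tb) ↔ (l1 = l2) := by
            rw [← pvSameRoot_iff_roots hta htb, hpart a b hap hbp, hl1, hl2]
            exact ⟨fun h => Option.some.inj h, fun h => by rw [h]⟩
          rw [pvSameRoot_iff_roots (hfwd1 a ta hta) (hfwd1 b tb htb), hget' a, hget' b,
            hl1, hl2]
          constructor
          · intro h
            by_cases h1 : ta = ru <;> by_cases h2 : tb = ru
            · rw [if_pos (by rw [ha1.mp h1]), if_pos (by rw [hb1.mp h2])]
            · rw [if_pos h1, if_neg h2] at h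
              have hl2b : l2 = lb := hb2.mp h.symm
              rw [if_pos (by rw [ha1.mp h1]),
                if_neg (by rw [hl2b]; exact fun hh => hab (Option.some.inj hh).symm), hl2b]
            · rw [if_neg h1, if_pos h2] at h
              have hl1b : l1 = lb := ha2.mp h
              rw [if_neg (by rw [hl1b]; exact fun hh => hab (Option.some.inj hh).symm),
                if_pos (by rw [hb1.mp h2]), hl1b]
            · rw [if_neg h1, if_neg h2] at h
              rw [if_neg (fun hh => h1 (ha1.mpr (Option.some.inj hh))),
                if_neg (fun hh => h2 (hb1.mpr (Option.some.inj hh))), hab12.mp h]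
          · intro h
            by_cases e1 : l1 = la <;> by_cases e2 : l2 = la
            · rw [if_pos (ha1.mpr e1), if_pos (hb1.mpr e2)]
            · rw [if_pos (by rw [e1]), if_neg (fun hh => e2 (Option.some.inj hh))] at h
              have htbrv : tb = rv := hb2.mpr (Option.some.inj h.symm)
              have hh1 : ta = ru := ha1.mpr e1
              have hh2 : ¬ tb = ru := by rw [htbrv]; exact fun hh => hrur hh.symm
              rw [if_pos hh1, if_neg hh2, htbrv]
            · rw [if_neg (fun hh => e1 (Option.some.inj hh)), if_pos (by rw [e2])] at h
              have htarv : ta = rv := ha2.mpr (Option.some.inj h)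
              have hh2 : tb = ru := hb1.mpr e2
              have hh1 : ¬ ta = ru := by rw [htarv]; exact fun hh => hrur hh.symm
              rw [if_neg hh1, if_pos hh2, htarv]
            · rw [if_neg (fun hh => e1 (Option.some.inj hh)),
                if_neg (fun hh => e2 (Option.some.inj hh))] at h
              have hteq : ta = tb := hab12.mpr (Option.some.inj h)
              rw [if_neg (fun hh => e1 (ha1.mp hh)), if_neg (fun hh => e2 (hb1.mp hh)), hteq]

-- ===== the base invariant and the main fold =====
theorem pvInv_nil : pvInv [] ⟨[]⟩ ⟨[]⟩ 0 := by
  refine ⟨?_, ?_, ?_, ?_, ?_, ?_, ?_⟩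
  · intro z; exact ⟨z, 0, le_refl _, .root z (Or.inl rfl)⟩
  · intro z y h; simp [PySem.Dict.get?] at h
  · intro z; exact Iff.rfl
  · intro rc h; cases h
  · exact PySem.Dict.nodup_keys_empty
  · intro z l h; simp [PySem.Dict.get?] at h
  · intro a b ha _; simp [PySem.Dict.contains] at ha

theorem pvFold_sim (fuel : Nat) :
    ∀ (rest pre : List (Int × Int)) (p comp : PySem.Dict Int Int) (nxt : Int),
      pvInv pre p comp nxt → pre.length + rest.length ≤ fuel →
      pvInv (pre ++ rest)
        (rest.foldl (fun p rc => pvUnionA fuel p rc.1 (Int.not rc.2)) p)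
        (rest.foldl pvStepB (comp, nxt)).1 (rest.foldl pvStepB (comp, nxt)).2 := by
  intro rest
  induction rest with
  | nil =>
    intro pre p comp nxt h _
    simpa using h
  | cons rc rest ih =>
    intro pre p comp nxt hInv hlen
    have hf : pre.length < fuel := by simp at hlen; omega
    have hstep := pvStep_sim fuel pre p comp nxt rc hInv hf
    have hrec := ih (pre ++ [rc]) _ _ _ hstep (by simp at hlen ⊢; omega)
    simpa [List.append_assoc] using hrec

-- the (pure) root-chasing function, used to name A's find results
def pvRootFn : Nat → PySem.Dict Int Int → Int → Int
  | 0, _, x => x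
  | f+1, p, x =>
    match p.get? x with
    | none => x
    | some y => if y = x then x else pvRootFn f p y

theorem pvRootFn_eq : ∀ (fuel : Nat) (p : PySem.Dict Int Int) (x r : Int) (n : Nat),
    pvRootOfN p x r n → n < fuel → pvRootFn fuel p x = r := by
  intro fuel
  induction fuel with
  | zero => intro _ _ _ _ _ h; omega
  | succ f ih =>
    intro p x r n h hn
    cases h with
    | root _ hx =>
      rcases hx with hx | hx
      · simp [pvRootFn, hx]
      · simp [pvRootFn, hx]
    | step _ y _ n' hg hne h' =>
      have hstep : pvRootFn (f+1) p x = pvRootFn f p y := by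
        simp [pvRootFn, hg, hne]
      rw [hstep]
      exact ih p y r n' h' (by omega)

theorem pvRootFn_root (p : PySem.Dict Int Int) (B fuel : Nat)
    (hB : pvBnd p B) (hf : B < fuel) : ∀ z, pvRootOf p z (pvRootFn fuel p z) := by
  intro z
  obtain ⟨r, n, hn, h⟩ := hB z
  rw [pvRootFn_eq fuel p z r n h (by omega)]
  exact ⟨n, h⟩

-- the final set comprehension of A collects exactly the root values
theorem pvCompr (fuel B : Nat) (rootf : Int → Int) :
    ∀ (rest : List (Int × Int)) (s : PySem.Set Int) (p : PySem.Dict Int Int),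
      pvBnd p B → (∀ z, pvRootOf p z (rootf z)) → B < fuel →
      (rest.foldl (fun (acc : PySem.Set Int × PySem.Dict Int Int) rc =>
          let fr := pvFindA fuel acc.2 rc.1
          (PySem.Set.add acc.1 fr.1, fr.2)) (s, p)).1
        = rest.foldl (fun s rc => PySem.Set.add s (rootf rc.1)) s := by
  intro rest
  induction rest with
  | nil => intro s p _ _ _; rfl
  | cons rc rest ih =>
    intro s p hB hroot hf
    obtain ⟨r, n, hn, h⟩ := hB rc.1
    have hr : r = rootf rc.1 := pvRootOf_unique ⟨n, h⟩ (hroot rc.1)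
    obtain ⟨hv1, hfwd, _, _, _, _, _⟩ := pvFindA_spec fuel p rc.1 r n h (by omega)
    have hB2 : pvBnd (pvFindA fuel p rc.1).2 B := by
      intro z
      obtain ⟨r2, n2, hn2, h2⟩ := hB z
      obtain ⟨m2, hm2, hN2⟩ := hfwd z r2 n2 h2
      exact ⟨r2, m2, le_trans hm2 hn2, hN2⟩
    have hroot2 : ∀ z, pvRootOf (pvFindA fuel p rc.1).2 z (rootf z) := by
      intro z
      obtain ⟨m, hm⟩ := hroot z
      obtain ⟨m2, _, hN2⟩ := hfwd z (rootf z) m hm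
      exact ⟨m2, hN2⟩
    simp only [List.foldl_cons]
    rw [hv1, hr]
    exact ih _ _ hB2 hroot2 hf

-- two labellings with the same kernel have the same number of distinct values
theorem pv_count_pairs : ∀ (L : List (Int × Int)),
    (∀ x ∈ L, ∀ y ∈ L, x.1 = y.1 ↔ x.2 = y.2) →
    (L.map Prod.fst).toFinset.card = (L.map Prod.snd).toFinset.card := by
  intro L
  induction L with
  | nil => intro _; rfl
  | cons ab L ih =>
    intro h
    obtain ⟨a, b⟩ := ab
    simp only [List.map_cons, List.toFinset_cons]
    have hrest : ∀ x ∈ L, ∀ y ∈ L, x.1 = y.1 ↔ x.2 = y.2 := fun x hx y hy =>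
      h x (List.mem_cons_of_mem _ hx) y (List.mem_cons_of_mem _ hy)
    by_cases ha : a ∈ L.map Prod.fst
    · obtain ⟨x, hxm, hxa⟩ := List.mem_map.mp ha
      have hxb : x.2 = b :=
        ((h x (List.mem_cons_of_mem _ hxm) (a, b) List.mem_cons_self).mp hxa).trans rfl
      have hb : b ∈ L.map Prod.snd := List.mem_map.mpr ⟨x, hxm, hxb⟩
      rw [Finset.insert_eq_self.mpr (List.mem_toFinset.mpr ha),
        Finset.insert_eq_self.mpr (List.mem_toFinset.mpr hb)]
      exact ih hrest
    · have hb : b ∉ L.map Prod.snd := by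
        intro hbm
        obtain ⟨x, hxm, hxb⟩ := List.mem_map.mp hbm
        have hxa : x.1 = a :=
          (h x (List.mem_cons_of_mem _ hxm) (a, b) List.mem_cons_self).mpr (hxb.trans rfl)
        exact ha (List.mem_map.mpr ⟨x, hxm, hxa⟩)
      rw [Finset.card_insert_of_notMem (fun hm => ha (List.mem_toFinset.mp hm)),
        Finset.card_insert_of_notMem (fun hm => hb (List.mem_toFinset.mp hm)),
        ih hrest]

theorem pv_len_ofList_eq_card (xs : List Int) :
    (PySem.Set.ofList xs).length = xs.toFinset.card := by
  have h1 : (PySem.Set.ofList xs).toFinset = xs.toFinset := by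
    ext z
    simp only [List.mem_toFinset]
    exact PySem.Set.mem_ofList xs z
  rw [← List.toFinset_card_of_nodup (PySem.Set.nodup_ofList xs), h1]

-- ===== VERDICT (by name: the statement is the Claim_ definition above) =====
theorem maxRemove_spec : Claim_equal_maxRemove := by
  unfold Claim_equal_maxRemove Spec_maxRemove
  intro stones _
  have hInv := pvFold_sim (stones.length + 1) stones [] ⟨[]⟩ ⟨[]⟩ 0 pvInv_nil
    (by simp only [List.length_nil]; omega)
  rw [List.nil_append] at hInv
  set p := stones.foldl (fun p rc => pvUnionA (stones.length + 1) p rc.1 (Int.not rc.2))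
    (⟨[]⟩ : PySem.Dict Int Int) with hp
  set st := stones.foldl pvStepB ((⟨[]⟩ : PySem.Dict Int Int), (0 : Int)) with hst
  obtain ⟨hBnd, hPOK, hkeys, hpre, hnd, hlab, hpart⟩ := hInv
  have hroots := pvRootFn_root p stones.length (stones.length + 1) hBnd (by omega)
  have hcompr := pvCompr (stones.length + 1) stones.length (pvRootFn (stones.length + 1) p)
    stones PySem.Set.empty p hBnd hroots (by omega)
  have hA : maxRemove stones = (stones.length : Int)
      - ((PySem.Set.ofList (stones.map (fun rc => pvRootFn (stones.length + 1) p rc.1))).length : Int) := by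
    simp only [maxRemove]
    rw [← hp, hcompr, PySem.Set.ofList_eq_foldl, List.foldl_map]
    rfl
  have hB : maxRemove_alt stones = (stones.length : Int)
      - ((PySem.Set.ofList (stones.map (fun rc => (st.1.get? rc.1).getD 0))).length : Int) := by
    simp only [maxRemove_alt]
    rw [← hst, PySem.Set.ofList_eq_foldl, List.foldl_map]
    rfl
  rw [hA, hB]
  have hcond : ∀ x ∈ stones.map (fun rc =>
        (pvRootFn (stones.length + 1) p rc.1, (st.1.get? rc.1).getD 0)),
      ∀ y ∈ stones.map (fun rc =>
        (pvRootFn (stones.length + 1) p rc.1, (st.1.get? rc.1).getD 0)),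
      x.1 = y.1 ↔ x.2 = y.2 := by
    intro x hx y hy
    obtain ⟨rc1, hm1, rfl⟩ := List.mem_map.mp hx
    obtain ⟨rc2, hm2, rfl⟩ := List.mem_map.mp hy
    have hc1 : p.contains rc1.1 = true := (hkeys _).mpr (hpre rc1 hm1).1
    have hc2 : p.contains rc2.1 = true := (hkeys _).mpr (hpre rc2 hm2).1
    obtain ⟨l1, hl1⟩ := pv_get?_some_of_contains ((hkeys _).mp hc1)
    obtain ⟨l2, hl2⟩ := pv_get?_some_of_contains ((hkeys _).mp hc2)
    simp only [hl1, hl2, Option.getD_some]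
    rw [← pvSameRoot_iff_roots (hroots rc1.1) (hroots rc2.1), hpart _ _ hc1 hc2, hl1, hl2]
    exact ⟨fun h => Option.some.inj h, fun h => by rw [h]⟩
  have hcnt := pv_count_pairs _ hcond
  rw [List.map_map, List.map_map] at hcnt
  have hcnt' : (stones.map (fun rc => pvRootFn (stones.length + 1) p rc.1)).toFinset.card
      = (stones.map (fun rc => (st.1.get? rc.1).getD 0)).toFinset.card := hcnt
  have hlen2 : (PySem.Set.ofList (stones.map (fun rc => pvRootFn (stones.length + 1) p rc.1))).length
      = (PySem.Set.ofList (stones.map (fun rc => (st.1.get? rc.1).getD 0))).length := by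
    rw [pv_len_ofList_eq_card, pv_len_ofList_eq_card, hcnt']
  rw [hlen2]
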